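-- pv_equiv track=rewrite | github.com/andreasatle/bounded-adversarial-production | src/baps/example_roles.py | _parse_red_output
-- ===== SOURCE A (Python) =====
-- def _parse_red_output(generated_text: str, default_material: bool) -> tuple[bool, str]:
--     material = default_material
--     claim: str | None = None
--
--     for raw_line in generated_text.splitlines():
--         line = raw_line.strip()
--         upper = line.upper()
--         if upper.startswith("MATERIAL:"):
--             value = line.split(":", 1)[1].strip().lower()
--             if value == "yes":
--                 material = True
--             elif value == "no":
--                 material = False
--         elif upper.startswith("CLAIM:"):
--             claim = line.split(":", 1)[1].strip()
--
--     if claim is None or not claim: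
--         claim = generated_text
--     return material, claim
-- ===== SOURCE B (Python) =====
-- def _parse_red_output(generated_text: str, default_material: bool) -> tuple[bool, str]:
--     # Single backward scan: last-occurrence-wins becomes first-match-from-the-end,
--     # so we can stop as soon as both fields are resolved.
--     material = None
--     claim = None
--     for raw_line in reversed(generated_text.splitlines()):
--         if material is not None and claim is not None:
--             break
--         line = raw_line.strip()
--         upper = line.upper()
--         if upper.startswith("MATERIAL:"):
--             if material is None:
--                 value = line.split(":", 1)[1].strip().lower()
--                 if value == "yes":
--                     material = True
--                 elif value == "no":
--                     material = False
--         elif upper.startswith("CLAIM:"):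
--             if claim is None:
--                 claim = line.split(":", 1)[1].strip()
--     if material is None:
--         material = default_material
--     if not claim:
--         claim = generated_text
--     return material, claim
-- ===== Notes on version B (the rewrite author's own statement) =====
-- stated objective: alternative
-- what changed: A scans all lines forward, letting later MATERIAL/CLAIM lines overwrite earlier ones; B scans the lines in reverse with not-yet-found sentinels, taking the first match from the end for each field and breaking as soon as both are resolved.
import Mathlib
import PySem

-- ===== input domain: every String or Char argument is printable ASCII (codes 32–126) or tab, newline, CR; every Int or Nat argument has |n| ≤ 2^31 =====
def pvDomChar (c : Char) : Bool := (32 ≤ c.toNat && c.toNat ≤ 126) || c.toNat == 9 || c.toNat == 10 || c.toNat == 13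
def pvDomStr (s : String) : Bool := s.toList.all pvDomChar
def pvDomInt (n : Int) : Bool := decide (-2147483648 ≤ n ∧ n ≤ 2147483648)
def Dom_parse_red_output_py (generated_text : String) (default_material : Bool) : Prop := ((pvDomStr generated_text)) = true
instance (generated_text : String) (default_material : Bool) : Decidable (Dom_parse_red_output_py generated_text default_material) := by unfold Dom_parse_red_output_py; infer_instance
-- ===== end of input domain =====

-- B replaces A's forward scan with a single backward scan over the lines (last-occurrence-wins
-- becomes first-match-from-the-end) that stops once both fields are resolved; objective: alternative.

-- ===== PORT A =====
-- line.split(":", 1)[1]: maxsplit 1 ≠ "" sep never fails, and the branch guard guarantees a ':'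
-- is present, so index 1 exists; ported as getD (exact under the guard).
def pvFieldVal (line : String) : String :=
  PySem.Str.strip (((PySem.Str.splitMax? line ":" 1).getD []).getD 1 "")

def pvStepA (acc : Bool × Option String) (raw_line : String) : Bool × Option String :=
  let line := PySem.Str.strip raw_line
  let upper := PySem.Str.upper line
  if PySem.Str.startswith upper "MATERIAL:" then
    let value := PySem.Str.lower (pvFieldVal line)
    if value == "yes" then (true, acc.2)
    else if value == "no" then (false, acc.2)
    else acc
  else if PySem.Str.startswith upper "CLAIM:" then
    (acc.1, some (pvFieldVal line))
  else acc

def parse_red_output_py (generated_text : String) (default_material : Bool) : Bool × String :=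
  let st := (PySem.Str.splitlines generated_text).foldl pvStepA (default_material, none)
  match st.2 with
  | none => (st.1, generated_text)
  | some c => if c == "" then (st.1, generated_text) else (st.1, c)

-- ===== PORT B =====
def pvLoopB : List String → Option Bool → Option String → Option Bool × Option String
  | [], material, claim => (material, claim)
  | raw_line :: rest, material, claim =>
    if material.isSome && claim.isSome then (material, claim)
    else
      let line := PySem.Str.strip raw_line
      let upper := PySem.Str.upper line
      if PySem.Str.startswith upper "MATERIAL:" then
        if material.isNone then
          let value := PySem.Str.lower (pvFieldVal line)
          if value == "yes" then pvLoopB rest (some true) claim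
          else if value == "no" then pvLoopB rest (some false) claim
          else pvLoopB rest material claim
        else pvLoopB rest material claim
      else if PySem.Str.startswith upper "CLAIM:" then
        if claim.isNone then pvLoopB rest material (some (pvFieldVal line))
        else pvLoopB rest material claim
      else pvLoopB rest material claim

def parse_red_output_py_alt (generated_text : String) (default_material : Bool) : Bool × String :=
  let st := pvLoopB (PySem.Str.splitlines generated_text).reverse none none
  let material := st.1.getD default_material
  match st.2 with
  | none => (material, generated_text)
  | some c => if c == "" then (material, generated_text) else (material, c)

-- ===== PRECONDITION & SPEC =====
def Spec_parse_red_output_py (generated_text : String) (default_material : Bool) (out : Bool × String) : Prop := out = parse_red_output_py_alt generated_text default_material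
instance (generated_text : String) (default_material : Bool) (out : Bool × String) : Decidable (Spec_parse_red_output_py generated_text default_material out) := by unfold Spec_parse_red_output_py; infer_instance

-- ===== CLAIM (what is proved, stated in full; the proofs are below) =====
def Claim_equal_parse_red_output_py : Prop := ∀ (generated_text : String) (default_material : Bool), Dom_parse_red_output_py generated_text default_material → Spec_parse_red_output_py generated_text default_material (parse_red_output_py generated_text default_material)

-- ===== LEMMAS AND PROOFS =====

/-- The value a line contributes to `material` (`none` = no change). -/
def pvMVal (raw_line : String) : Option Bool :=
  let line := PySem.Str.strip raw_line
  if PySem.Str.startswith (PySem.Str.upper line) "MATERIAL:" then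
    let value := PySem.Str.lower (pvFieldVal line)
    if value == "yes" then some true
    else if value == "no" then some false
    else none
  else none

/-- The value a line contributes to `claim` (`none` = no change). -/
def pvCVal (raw_line : String) : Option String :=
  let line := PySem.Str.strip raw_line
  if PySem.Str.startswith (PySem.Str.upper line) "MATERIAL:" then none
  else if PySem.Str.startswith (PySem.Str.upper line) "CLAIM:" then some (pvFieldVal line)
  else none

theorem pvStepA_eq (acc : Bool × Option String) (x : String) :
    pvStepA acc x = ((pvMVal x).getD acc.1, (pvCVal x).or acc.2) := by
  simp only [pvStepA, pvMVal, pvCVal]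
  split_ifs <;> simp [Option.or]

theorem pvFoldA_eq (l : List String) (m : Bool) (c : Option String) :
    l.foldl pvStepA (m, c) =
      ((l.reverse.findSome? pvMVal).getD m, (l.reverse.findSome? pvCVal).or c) := by
  induction l generalizing m c with
  | nil => simp
  | cons x l ih =>
    simp only [List.foldl_cons, pvStepA_eq, List.reverse_cons, List.findSome?_append, ih,
      Prod.mk.injEq]
    refine ⟨?_, ?_⟩
    · cases l.reverse.findSome? pvMVal <;> simp [Option.or]
    · cases l.reverse.findSome? pvCVal <;> simp [Option.or]

theorem pvLoopB_eq (l : List String) (m : Option Bool) (c : Option String) :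
    pvLoopB l m c = (m.or (l.findSome? pvMVal), c.or (l.findSome? pvCVal)) := by
  induction l generalizing m c with
  | nil => simp [pvLoopB]
  | cons x l ih =>
    by_cases hb : (m.isSome && c.isSome) = true
    · rcases m with _ | mv <;> rcases c with _ | cv <;> simp_all [pvLoopB, Option.or]
    · have hstep : pvLoopB (x :: l) m c = pvLoopB l (m.or (pvMVal x)) (c.or (pvCVal x)) := by
        rcases m with _ | mv <;> rcases c with _ | cv <;>
          simp_all [pvLoopB, pvMVal, pvCVal, Option.or] <;> split_ifs <;> simp_all
      rw [hstep, ih]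
      simp only [Prod.mk.injEq]
      refine ⟨?_, ?_⟩
      · cases h : pvMVal x <;> cases m <;> simp [Option.or, h]
      · cases h : pvCVal x <;> cases c <;> simp [Option.or, h]

-- ===== VERDICT (by name: the statement is the Claim_ definition above) =====
theorem parse_red_output_py_spec : Claim_equal_parse_red_output_py := by
  intro t d _
  unfold Spec_parse_red_output_py parse_red_output_py parse_red_output_py_alt
  rw [pvFoldA_eq, pvLoopB_eq]
  simp
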